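-- pv_equiv track=rewrite | github.com/abasiman/Revised_Assignment2 | DiskScheduling.py | optimized_scan
-- ===== SOURCE A (Python) =====
-- def calculate_movements(cylinders, start_position):
--     total_moves = 0
--     current_position = start_position
--     for cylinder in cylinders:
--         total_moves += abs(cylinder - current_position)
--         current_position = cylinder
--     return total_moves
--
-- def optimized_scan(cylinders, start_position):
--     lower_cylinders = [c for c in cylinders if c <= start_position]
--     upper_cylinders = [c for c in cylinders if c > start_position]
--
--     total_moves = 0
--     if lower_cylinders:
--         lower_cylinders.sort(reverse=True)
--         total_moves += calculate_movements(lower_cylinders, start_position)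
--
--     if upper_cylinders:
--         upper_cylinders.sort()
--         if lower_cylinders:
--             total_moves += abs(lower_cylinders[0] - upper_cylinders[0])
--         total_moves += calculate_movements(upper_cylinders, upper_cylinders[0])
--     else:
--         if lower_cylinders:
--             total_moves += calculate_movements(upper_cylinders, start_position)
--     return total_moves
-- ===== SOURCE B (Python) =====
-- def optimized_scan(cylinders, start_position):
--     if not cylinders:
--         return 0
--     mn = min(cylinders)
--     mx = max(cylinders)
--     if mx <= start_position:
--         # no cylinder above the head: it only sweeps down to the minimum
--         return start_position - mn
--     if mn > start_position:
--         # no cylinder at or below the head: only min(upper)..max(upper) is charged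
--         return mx - mn
--     # both partitions nonempty: start -> min(lower), jump max(lower) -> min(upper),
--     # then min(upper) -> max(upper); the min(upper) terms telescope away
--     lo_max = max([c for c in cylinders if c <= start_position])
--     return start_position - mn + mx - lo_max
-- ===== Notes on version B (the rewrite author's own statement) =====
-- stated objective: faster
-- what changed: Replaced sorting both partitions and walking them element by element with a closed form: the total is start-min(all)+max(all)-max(lower) (the min(upper) jump telescopes away), computed from three linear min/max scans with no sort and no per-element walk.
import Mathlib
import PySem

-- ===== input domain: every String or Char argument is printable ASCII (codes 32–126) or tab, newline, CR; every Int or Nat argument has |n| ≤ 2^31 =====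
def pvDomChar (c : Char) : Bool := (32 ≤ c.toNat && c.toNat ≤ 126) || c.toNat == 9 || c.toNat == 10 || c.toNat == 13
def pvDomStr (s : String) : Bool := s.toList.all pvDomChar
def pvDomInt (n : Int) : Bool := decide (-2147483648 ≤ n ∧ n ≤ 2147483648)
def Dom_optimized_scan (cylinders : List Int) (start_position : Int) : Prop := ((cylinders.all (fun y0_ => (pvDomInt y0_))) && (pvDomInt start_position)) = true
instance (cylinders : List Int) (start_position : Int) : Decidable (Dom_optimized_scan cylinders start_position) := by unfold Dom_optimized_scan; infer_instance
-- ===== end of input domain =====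

-- B replaces A's sort-both-partitions-and-walk algorithm by a closed form over the
-- partitions' minima/maxima (objective: faster — no sorting, O(n) instead of O(n log n)).

-- ===== PORT A =====
def calculate_movements (cylinders : List Int) (start_position : Int) : Int :=
  (cylinders.foldl (fun st c => (st.1 + |c - st.2|, c)) ((0 : Int), start_position)).1

def optimized_scan (cylinders : List Int) (start_position : Int) : Int :=
  let lower_cylinders := cylinders.filter (fun c => decide (c ≤ start_position))
  let upper_cylinders := cylinders.filter (fun c => decide (c > start_position))
  -- first if: sort lower descending (in place in Python) and walk it from start_position
  let lower_sorted := PySem.List.sorted lower_cylinders (fun x => x) true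
  let total_moves : Int :=
    if lower_cylinders ≠ [] then calculate_movements lower_sorted start_position else 0
  -- second if / else
  if upper_cylinders ≠ [] then
    let upper_sorted := PySem.List.sorted upper_cylinders (fun x => x) false
    let total_moves :=
      if lower_cylinders ≠ [] then
        total_moves + |lower_sorted.headD 0 - upper_sorted.headD 0|
      else total_moves
    total_moves + calculate_movements upper_sorted (upper_sorted.headD 0)
  else
    if lower_cylinders ≠ [] then
      total_moves + calculate_movements upper_cylinders start_position
    else total_moves

-- ===== PORT B =====
def optimized_scan_alt (cylinders : List Int) (start_position : Int) : Int :=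
  if cylinders = [] then 0
  else
    let mn := (PySem.List.min? cylinders (fun x => x)).getD 0
    let mx := (PySem.List.max? cylinders (fun x => x)).getD 0
    if mx ≤ start_position then start_position - mn
    else if mn > start_position then mx - mn
    else
      let lo_max := (PySem.List.max?
        (cylinders.filter (fun c => decide (c ≤ start_position))) (fun x => x)).getD 0
      start_position - mn + mx - lo_max

-- ===== PRECONDITION & SPEC =====
def Spec_optimized_scan (cylinders : List Int) (start_position : Int) (out : Int) : Prop := out = optimized_scan_alt cylinders start_position
instance (cylinders : List Int) (start_position : Int) (out : Int) : Decidable (Spec_optimized_scan cylinders start_position out) := by unfold Spec_optimized_scan; infer_instance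

-- ===== CLAIM (what is proved, stated in full; the proofs are below) =====
def Claim_equal_optimized_scan : Prop := ∀ (cylinders : List Int) (start_position : Int), Dom_optimized_scan cylinders start_position → Spec_optimized_scan cylinders start_position (optimized_scan cylinders start_position)

-- ===== LEMMAS AND PROOFS =====

-- accumulator shift for the walk
theorem calcMov_shift (xs : List Int) (a p : Int) :
    (xs.foldl (fun st c => (st.1 + |c - st.2|, c)) (a, p)).1
      = a + (xs.foldl (fun st c => (st.1 + |c - st.2|, c)) ((0 : Int), p)).1 := by
  induction xs generalizing a p with
  | nil => simp
  | cons x t ih =>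
      simp only [List.foldl_cons]
      rw [ih, ih (0 + |x - p|)]
      ring

theorem calcMov_cons (x : Int) (t : List Int) (p : Int) :
    calculate_movements (x :: t) p = |x - p| + calculate_movements t x := by
  simp only [calculate_movements, List.foldl_cons]
  rw [calcMov_shift]
  ring

-- walking a descending chain from above telescopes to p - last
theorem calcMov_desc (xs : List Int) (p : Int)
    (hpair : xs.Pairwise (fun a b => b ≤ a)) (hle : ∀ x ∈ xs, x ≤ p) :
    calculate_movements xs p = p - xs.getLastD p := by
  induction xs generalizing p with
  | nil => simp [calculate_movements]
  | cons x t ih =>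
      rw [calcMov_cons]
      have hxp : x ≤ p := hle x (by simp)
      have habs : |x - p| = p - x := by rw [abs_sub_comm]; exact abs_of_nonneg (by omega)
      have ht := ih x (List.Pairwise.of_cons hpair)
        (fun y hy => (List.pairwise_cons.mp hpair).1 y hy)
      rw [habs, ht, List.getLastD_cons]
      ring

-- walking an ascending chain from below telescopes to last - p
theorem calcMov_asc (xs : List Int) (p : Int)
    (hpair : xs.Pairwise (fun a b => a ≤ b)) (hle : ∀ x ∈ xs, p ≤ x) :
    calculate_movements xs p = xs.getLastD p - p := by
  induction xs generalizing p with
  | nil => simp [calculate_movements]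
  | cons x t ih =>
      rw [calcMov_cons]
      have hxp : p ≤ x := hle x (by simp)
      have habs : |x - p| = x - p := abs_of_nonneg (by omega)
      have ht := ih x (List.Pairwise.of_cons hpair)
        (fun y hy => (List.pairwise_cons.mp hpair).1 y hy)
      rw [habs, ht, List.getLastD_cons]
      ring

theorem getLastD_mem (xs : List Int) (d : Int) (h : xs ≠ []) : xs.getLastD d ∈ xs := by
  induction xs generalizing d with
  | nil => exact absurd rfl h
  | cons x t ih =>
      rw [List.getLastD_cons]
      cases t with
      | nil => simp
      | cons y u => exact List.mem_cons_of_mem x (ih y (by simp))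

theorem getLastD_le_of_desc (xs : List Int) (d : Int)
    (hpair : xs.Pairwise (fun a b => b ≤ a)) : ∀ x ∈ xs, xs.getLastD d ≤ x := by
  induction xs generalizing d with
  | nil => intro x hx; simp at hx
  | cons x t ih =>
      intro y hy
      rw [List.getLastD_cons]
      rcases List.mem_cons.mp hy with rfl | hyt
      · cases t with
        | nil => simp
        | cons z u =>
            have hzy : (z :: u).getLastD y ≤ z :=
              ih y (List.Pairwise.of_cons hpair) z (by simp)
            have : z ≤ y := (List.pairwise_cons.mp hpair).1 z (by simp)
            omega
      · exact ih x (List.Pairwise.of_cons hpair) y hyt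

theorem le_getLastD_of_asc (xs : List Int) (d : Int)
    (hpair : xs.Pairwise (fun a b => a ≤ b)) : ∀ x ∈ xs, x ≤ xs.getLastD d := by
  induction xs generalizing d with
  | nil => intro x hx; simp at hx
  | cons x t ih =>
      intro y hy
      rw [List.getLastD_cons]
      rcases List.mem_cons.mp hy with rfl | hyt
      · cases t with
        | nil => simp
        | cons z u =>
            have hzy : z ≤ (z :: u).getLastD y :=
              ih y (List.Pairwise.of_cons hpair) z (by simp)
            have : y ≤ z := (List.pairwise_cons.mp hpair).1 z (by simp)
            omega
      · exact ih x (List.Pairwise.of_cons hpair) y hyt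

-- last of the descending sort is the minimum (as min? computes it)
theorem getLastD_sorted_rev_eq_min (xs : List Int) (d : Int) (h : xs ≠ []) :
    (PySem.List.sorted xs (fun x => x) true).getLastD d
      = (PySem.List.min? xs (fun x => x)).getD 0 := by
  have hperm : (PySem.List.sorted xs (fun x => x) true).Perm xs := PySem.List.sorted_perm ..
  have hne : PySem.List.sorted xs (fun x => x) true ≠ [] := by
    intro hnil; exact h ((PySem.List.sorted_eq_nil_iff xs (fun x => x) true).mp hnil)
  obtain ⟨m, hm⟩ : ∃ m, PySem.List.min? xs (fun x => x) = some m := by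
    cases hmin : PySem.List.min? xs (fun x => x) with
    | none => exact absurd ((PySem.List.min?_eq_none_iff xs (fun x => x)).mp hmin) h
    | some m => exact ⟨m, rfl⟩
  rw [hm]
  have hmem : (PySem.List.sorted xs (fun x => x) true).getLastD d ∈ xs :=
    hperm.mem_iff.mp (getLastD_mem _ d hne)
  have hmin2 : ∀ x ∈ xs, (PySem.List.sorted xs (fun x => x) true).getLastD d ≤ x := by
    intro x hx
    exact getLastD_le_of_desc _ d (PySem.List.sorted_pairwise_rev ..) x (hperm.mem_iff.mpr hx)
  have h1 : (PySem.List.sorted xs (fun x => x) true).getLastD d ≤ m :=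
    hmin2 m (PySem.List.min?_mem hm)
  have h2 : m ≤ (PySem.List.sorted xs (fun x => x) true).getLastD d :=
    PySem.List.min?_isMin hm _ hmem
  rw [Option.getD_some]; omega

-- last of the ascending sort is the maximum (as max? computes it)
theorem getLastD_sorted_eq_max (xs : List Int) (d : Int) (h : xs ≠ []) :
    (PySem.List.sorted xs (fun x => x) false).getLastD d
      = (PySem.List.max? xs (fun x => x)).getD 0 := by
  have hperm : (PySem.List.sorted xs (fun x => x) false).Perm xs := PySem.List.sorted_perm ..
  have hne : PySem.List.sorted xs (fun x => x) false ≠ [] := by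
    intro hnil; exact h ((PySem.List.sorted_eq_nil_iff xs (fun x => x) false).mp hnil)
  obtain ⟨m, hm⟩ : ∃ m, PySem.List.max? xs (fun x => x) = some m := by
    cases hmax : PySem.List.max? xs (fun x => x) with
    | none => exact absurd ((PySem.List.max?_eq_none_iff xs (fun x => x)).mp hmax) h
    | some m => exact ⟨m, rfl⟩
  rw [hm]
  have hmem : (PySem.List.sorted xs (fun x => x) false).getLastD d ∈ xs :=
    hperm.mem_iff.mp (getLastD_mem _ d hne)
  have hmax2 : ∀ x ∈ xs, x ≤ (PySem.List.sorted xs (fun x => x) false).getLastD d := by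
    intro x hx
    exact le_getLastD_of_asc _ d (PySem.List.sorted_pairwise ..) x (hperm.mem_iff.mpr hx)
  have h1 : m ≤ (PySem.List.sorted xs (fun x => x) false).getLastD d :=
    hmax2 m (PySem.List.max?_mem hm)
  have h2 : (PySem.List.sorted xs (fun x => x) false).getLastD d ≤ m :=
    PySem.List.max?_isMax hm _ hmem
  rw [Option.getD_some]; omega

-- head of the descending sort is the maximum
theorem headD_sorted_rev_eq_max (xs : List Int) (h : xs ≠ []) :
    (PySem.List.sorted xs (fun x => x) true).head?.getD 0
      = (PySem.List.max? xs (fun x => x)).getD 0 := by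
  have hperm : (PySem.List.sorted xs (fun x => x) true).Perm xs := PySem.List.sorted_perm ..
  cases hs : PySem.List.sorted xs (fun x => x) true with
  | nil => exact absurd ((PySem.List.sorted_eq_nil_iff xs (fun x => x) _).mp hs) h
  | cons hd t =>
      obtain ⟨m, hm⟩ : ∃ m, PySem.List.max? xs (fun x => x) = some m := by
        cases hmax : PySem.List.max? xs (fun x => x) with
        | none => exact absurd ((PySem.List.max?_eq_none_iff xs (fun x => x)).mp hmax) h
        | some m => exact ⟨m, rfl⟩
      rw [hm]
      have hge : ∀ y ∈ xs, y ≤ hd := PySem.List.key_head_sorted_rev_ge xs (fun x => x) hs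
      have hmem : hd ∈ xs := hperm.mem_iff.mp (hs ▸ (by simp))
      have h1 : m ≤ hd := hge m (PySem.List.max?_mem hm)
      have h2 : hd ≤ m := PySem.List.max?_isMax hm _ hmem
      simp only [List.head?_cons, Option.getD_some]; omega

-- head of the ascending sort is the minimum
theorem headD_sorted_eq_min (xs : List Int) (h : xs ≠ []) :
    (PySem.List.sorted xs (fun x => x) false).head?.getD 0
      = (PySem.List.min? xs (fun x => x)).getD 0 := by
  have hperm : (PySem.List.sorted xs (fun x => x) false).Perm xs := PySem.List.sorted_perm ..
  cases hs : PySem.List.sorted xs (fun x => x) false with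
  | nil => exact absurd ((PySem.List.sorted_eq_nil_iff xs (fun x => x) _).mp hs) h
  | cons hd t =>
      obtain ⟨m, hm⟩ : ∃ m, PySem.List.min? xs (fun x => x) = some m := by
        cases hmin : PySem.List.min? xs (fun x => x) with
        | none => exact absurd ((PySem.List.min?_eq_none_iff xs (fun x => x)).mp hmin) h
        | some m => exact ⟨m, rfl⟩
      rw [hm]
      have hle : ∀ y ∈ xs, hd ≤ y := PySem.List.key_head_sorted_le xs (fun x => x) hs
      have hmem : hd ∈ xs := hperm.mem_iff.mp (hs ▸ (by simp))
      have h1 : hd ≤ m := hle m (PySem.List.min?_mem hm)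
      have h2 : m ≤ hd := PySem.List.min?_isMin hm _ hmem
      simp only [List.head?_cons, Option.getD_some]; omega

-- the lower walk: sort descending then walk from start = start - min(lower)
theorem lower_walk (xs : List Int) (s : Int) (h : xs ≠ []) (hub : ∀ x ∈ xs, x ≤ s) :
    calculate_movements (PySem.List.sorted xs (fun x => x) true) s
      = s - (PySem.List.min? xs (fun x => x)).getD 0 := by
  have hperm : (PySem.List.sorted xs (fun x => x) true).Perm xs := PySem.List.sorted_perm ..
  rw [calcMov_desc _ s (PySem.List.sorted_pairwise_rev ..)
    (fun y hy => hub y (hperm.mem_iff.mp hy))]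
  rw [show (PySem.List.sorted xs (fun x => x) true).getLastD s
      = (PySem.List.min? xs (fun x => x)).getD 0 from getLastD_sorted_rev_eq_min xs s h]

-- the upper walk: sort ascending then walk from its head = max(upper) - min(upper)
theorem upper_walk (xs : List Int) (h : xs ≠ []) :
    calculate_movements (PySem.List.sorted xs (fun x => x) false)
        ((PySem.List.sorted xs (fun x => x) false).head?.getD 0)
      = (PySem.List.max? xs (fun x => x)).getD 0
        - (PySem.List.min? xs (fun x => x)).getD 0 := by
  cases hs : PySem.List.sorted xs (fun x => x) false with
  | nil => exact absurd ((PySem.List.sorted_eq_nil_iff xs (fun x => x) _).mp hs) h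
  | cons hd t =>
      have hpair : (hd :: t).Pairwise (fun a b => a ≤ b) := by
        have := PySem.List.sorted_pairwise (xs := xs) (key := fun x => x)
        rw [hs] at this; exact this
      have hle : ∀ x ∈ (hd :: t), hd ≤ x := by
        intro x hx
        rcases List.mem_cons.mp hx with rfl | hxt
        · omega
        · exact (List.pairwise_cons.mp hpair).1 x hxt
      have := calcMov_asc (hd :: t) hd hpair hle
      simp only [List.head?_cons, Option.getD_some]
      rw [this]
      have hmax : (hd :: t).getLastD hd = (PySem.List.max? xs (fun x => x)).getD 0 := by
        have := getLastD_sorted_eq_max xs hd h; rw [hs] at this; exact this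
      have hmin : hd = (PySem.List.min? xs (fun x => x)).getD 0 := by
        have := headD_sorted_eq_min xs h; rw [hs] at this
        simpa using this
      omega

theorem min?_getD_eq (xs : List Int) (m : Int) (hmem : m ∈ xs)
    (hmin : ∀ x ∈ xs, m ≤ x) : (PySem.List.min? xs (fun x => x)).getD 0 = m := by
  cases hm : PySem.List.min? xs (fun x => x) with
  | none =>
      exact absurd ((PySem.List.min?_eq_none_iff xs (fun x => x)).mp hm ▸ hmem) (by simp)
  | some m' =>
      have h1 : m' ≤ m := PySem.List.min?_isMin hm m hmem
      have h2 : m ≤ m' := hmin m' (PySem.List.min?_mem hm)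
      rw [Option.getD_some]; omega

theorem max?_getD_eq (xs : List Int) (m : Int) (hmem : m ∈ xs)
    (hmax : ∀ x ∈ xs, x ≤ m) : (PySem.List.max? xs (fun x => x)).getD 0 = m := by
  cases hm : PySem.List.max? xs (fun x => x) with
  | none =>
      exact absurd ((PySem.List.max?_eq_none_iff xs (fun x => x)).mp hm ▸ hmem) (by simp)
  | some m' =>
      have h1 : m ≤ m' := PySem.List.max?_isMax hm m hmem
      have h2 : m' ≤ m := hmax m' (PySem.List.max?_mem hm)
      rw [Option.getD_some]; omega

-- ===== VERDICT (by name: the statement is the Claim_ definition above) =====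
theorem optimized_scan_spec : Claim_equal_optimized_scan := by
  intro cylinders s _
  unfold Spec_optimized_scan optimized_scan optimized_scan_alt
  simp only [List.headD_eq_head?_getD]
  by_cases hc : cylinders = []
  · subst hc; simp
  · -- global minimum and maximum of cylinders
    obtain ⟨mn, hmin⟩ : ∃ m, PySem.List.min? cylinders (fun x => x) = some m := by
      cases hm : PySem.List.min? cylinders (fun x => x) with
      | none => exact absurd ((PySem.List.min?_eq_none_iff cylinders (fun x => x)).mp hm) hc
      | some m => exact ⟨m, rfl⟩
    obtain ⟨mx, hmax⟩ : ∃ m, PySem.List.max? cylinders (fun x => x) = some m := by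
      cases hm : PySem.List.max? cylinders (fun x => x) with
      | none => exact absurd ((PySem.List.max?_eq_none_iff cylinders (fun x => x)).mp hm) hc
      | some m => exact ⟨m, rfl⟩
    have hmn_mem : mn ∈ cylinders := PySem.List.min?_mem hmin
    have hmx_mem : mx ∈ cylinders := PySem.List.max?_mem hmax
    have hmn_min : ∀ x ∈ cylinders, mn ≤ x := fun x hx => PySem.List.min?_isMin hmin x hx
    have hmx_max : ∀ x ∈ cylinders, x ≤ mx := fun x hx => PySem.List.max?_isMax hmax x hx
    set lower := cylinders.filter (fun c => decide (c ≤ s)) with hlow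
    set upper := cylinders.filter (fun c => decide (c > s)) with hup
    rw [if_neg hc]
    simp only [hmin, hmax, Option.getD_some]
    by_cases hxs : mx ≤ s
    · -- everything is at or below the head: upper empty, lower = cylinders
      have hupper : upper = [] := by
        rw [hup, List.filter_eq_nil_iff]
        intro x hx
        have := hmx_max x hx
        simp; omega
      have hlower : lower = cylinders := by
        rw [hlow, List.filter_eq_self]
        intro x hx
        have := hmx_max x hx
        simp; omega
      rw [if_pos hxs]
      simp only [hupper, hlower, hc, ne_eq, not_false_eq_true, if_true, not_true_eq_false,
        if_false, ite_false]
      rw [lower_walk cylinders s hc (fun x hx => by have := hmx_max x hx; omega), hmin]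
      simp [calculate_movements]
    · rw [if_neg hxs]
      have hupper_ne : upper ≠ [] := by
        have hmem2 : mx ∈ upper := by
          rw [hup, List.mem_filter]
          exact ⟨hmx_mem, by simp; omega⟩
        intro h; rw [h] at hmem2; simp at hmem2
      by_cases hns : mn > s
      · -- everything is above the head: lower empty, upper = cylinders
        have hlower : lower = [] := by
          rw [hlow, List.filter_eq_nil_iff]
          intro x hx
          have := hmn_min x hx
          simp; omega
        have hupper : upper = cylinders := by
          rw [hup, List.filter_eq_self]
          intro x hx
          have := hmn_min x hx
          simp; omega
        rw [if_pos hns]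
        simp only [hlower, hupper, hc, ne_eq, not_true_eq_false, if_false, not_false_eq_true,
          if_true, ite_false]
        rw [upper_walk cylinders hc, hmin, hmax]
        simp
      · -- both partitions nonempty
        rw [if_neg hns]
        have hlower_ne : lower ≠ [] := by
          have : mn ∈ lower := by
            rw [hlow, List.mem_filter]
            exact ⟨hmn_mem, by simp; omega⟩
          intro h; rw [h] at this; simp at this
        simp only [hlower_ne, hupper_ne, ne_eq, not_false_eq_true, if_true]
        rw [lower_walk lower s hlower_ne
            (fun x hx => by rw [hlow] at hx; simpa using (List.mem_filter.mp hx).2),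
          upper_walk upper hupper_ne,
          headD_sorted_rev_eq_max lower hlower_ne, headD_sorted_eq_min upper hupper_ne]
        -- min over lower is the global min; max over upper is the global max
        have hminlow : (PySem.List.min? lower (fun x => x)).getD 0 = mn := by
          refine min?_getD_eq lower mn ?_ ?_
          · rw [hlow, List.mem_filter]; exact ⟨hmn_mem, by simp; omega⟩
          · intro x hx
            rw [hlow] at hx
            exact hmn_min x (List.mem_filter.mp hx).1
        have hmaxup : (PySem.List.max? upper (fun x => x)).getD 0 = mx := by
          refine max?_getD_eq upper mx ?_ ?_
          · rw [hup, List.mem_filter]; exact ⟨hmx_mem, by simp; omega⟩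
          · intro x hx
            rw [hup] at hx
            exact hmx_max x (List.mem_filter.mp hx).1
        obtain ⟨ml, hml⟩ : ∃ m, PySem.List.max? lower (fun x => x) = some m := by
          cases hm : PySem.List.max? lower (fun x => x) with
          | none => exact absurd ((PySem.List.max?_eq_none_iff lower (fun x => x)).mp hm) hlower_ne
          | some m => exact ⟨m, rfl⟩
        obtain ⟨mu, hmu⟩ : ∃ m, PySem.List.min? upper (fun x => x) = some m := by
          cases hm : PySem.List.min? upper (fun x => x) with
          | none => exact absurd ((PySem.List.min?_eq_none_iff upper (fun x => x)).mp hm) hupper_ne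
          | some m => exact ⟨m, rfl⟩
        have hml_le : ml ≤ s := by
          have := PySem.List.max?_mem hml
          rw [hlow] at this; simpa using (List.mem_filter.mp this).2
        have hmu_gt : s < mu := by
          have := PySem.List.min?_mem hmu
          rw [hup] at this; simpa using (List.mem_filter.mp this).2
        rw [hminlow, hmaxup, hml, hmu]
        simp only [Option.getD_some]
        have habs : |ml - mu| = mu - ml := by rw [abs_sub_comm]; exact abs_of_nonneg (by omega)
        rw [habs]
        ring
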